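-- pv_equiv track=rewrite | github.com/Lcoderfit/Introduction-to-algotithms | PythonLeetcode/BinarySearch/easy/1337. 矩阵中战斗力最弱的 K 行.py | find_rightmost
-- ===== SOURCE A (Python) =====
-- from typing import List
--
-- def find_rightmost(nums: List[int]) -> int:
--     n = len(nums)
--     if n == 0:
--         return 0
--     i, j = 0, n - 1
--     while i <= j:
--         mid = (i + j) // 2
--         if nums[mid] == 1:
--             i = mid + 1
--         else:
--             j = mid - 1
--     return i
-- ===== SOURCE B (Python) =====
-- from typing import List
--
-- def find_rightmost(nums: List[int]) -> int:
--     def go(seg, base):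
--         # binary search carried out on the sublist itself, offset kept in `base`
--         if not seg:
--             return base
--         m = (len(seg) - 1) // 2
--         if seg[m] == 1:
--             return go(seg[m + 1:], base + m + 1)
--         return go(seg[:m], base)
--     return go(nums, 0)
-- ===== Notes on version B (the rewrite author's own statement) =====
-- stated objective: alternative
-- what changed: The iterative two-index binary-search loop is replaced by a recursive helper that searches the sublist itself, passing slices and an offset accumulator instead of maintaining the (i, j) index pair; the empty-list case falls out of the base case instead of an explicit guard.
import Mathlib
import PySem

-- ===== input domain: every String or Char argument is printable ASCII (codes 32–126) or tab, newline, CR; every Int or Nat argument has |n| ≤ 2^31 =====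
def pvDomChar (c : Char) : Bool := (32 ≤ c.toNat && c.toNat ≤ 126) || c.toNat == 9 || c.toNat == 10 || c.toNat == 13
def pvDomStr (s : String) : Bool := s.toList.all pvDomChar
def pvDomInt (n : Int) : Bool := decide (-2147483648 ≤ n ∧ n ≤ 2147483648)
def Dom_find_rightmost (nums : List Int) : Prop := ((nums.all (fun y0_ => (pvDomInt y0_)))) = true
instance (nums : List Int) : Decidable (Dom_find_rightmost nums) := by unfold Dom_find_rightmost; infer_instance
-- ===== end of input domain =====

-- B replaces A's iterative two-index binary-search loop by a recursive helper on sublists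
-- (slices plus an offset accumulator); same comparison sequence and return value on every input.

-- ===== PORT A =====
-- A's while loop, state (i, j); on every call actually reached 0 ≤ i ≤ mid ≤ j < len,
-- so nums[mid] is always in range and `.getD 0` never supplies its default
def pvLoopA (nums : List Int) (i j : Int) : Int :=
  if h : i ≤ j then
    let mid := PySem.Int.floordiv (i + j) 2
    if (PySem.List.pyGet? nums mid).getD 0 = 1 then pvLoopA nums (mid + 1) j
    else pvLoopA nums i (mid - 1)
  else i
termination_by (j - i + 1).toNat
decreasing_by
  · have := PySem.Int.floordiv_two_mid_bounds h
    omega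
  · have := PySem.Int.floordiv_two_mid_bounds h
    omega

def find_rightmost (nums : List Int) : Int :=
  if (nums.length : Int) = 0 then 0 else pvLoopA nums 0 ((nums.length : Int) - 1)

-- ===== PORT B =====
-- Source B's `go(seg, base)`: Nat subtraction/division are exact here since they are only
-- taken with seg ≠ [], and seg[m] (0 ≤ m < len seg) is ported as getD, never defaulting;
-- the slices seg[m+1:] and seg[:m] (0 ≤ m < len seg) are List.drop / List.take
def pvGoB (seg : List Int) (base : Int) : Int :=
  if _h : seg = [] then base
  else
    let m := (seg.length - 1) / 2
    if seg.getD m 0 = 1 then pvGoB (seg.drop (m + 1)) (base + (m : Int) + 1)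
    else pvGoB (seg.take m) base
termination_by seg.length
decreasing_by
  · have : seg.length ≠ 0 := by simpa [List.length_eq_zero_iff] using _h
    simp only [List.length_drop]; omega
  · have : seg.length ≠ 0 := by simpa [List.length_eq_zero_iff] using _h
    simp only [List.length_take]; omega

def find_rightmost_alt (nums : List Int) : Int := pvGoB nums 0

-- ===== PRECONDITION & SPEC =====
def Spec_find_rightmost (nums : List Int) (out : Int) : Prop := out = find_rightmost_alt nums
instance (nums : List Int) (out : Int) : Decidable (Spec_find_rightmost nums out) := by unfold Spec_find_rightmost; infer_instance

-- ===== CLAIM (what is proved, stated in full; the proofs are below) =====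
def Claim_equal_find_rightmost : Prop := ∀ (nums : List Int), Dom_find_rightmost nums → Spec_find_rightmost nums (find_rightmost nums)

-- ===== LEMMAS AND PROOFS =====

-- A's loop on the window [i, j] computes exactly B's recursion on the corresponding sublist,
-- with the window's left end as the offset accumulator
lemma pvLoopA_eq_pvGoB : ∀ (n : Nat) (nums : List Int) (i j : Int),
    (j - i + 1).toNat ≤ n → 0 ≤ i → j < (nums.length : Int) →
    pvLoopA nums i j = pvGoB ((nums.drop i.toNat).take (j + 1 - i).toNat) i := by
  intro n
  induction n with
  | zero =>
    intro nums i j hn hi hj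
    have hij : ¬ i ≤ j := by omega
    rw [pvLoopA, pvGoB]
    have hseg : (j + 1 - i).toNat = 0 := by omega
    simp [hij, hseg]
  | succ n ih =>
    intro nums i j hn hi hj
    by_cases hij : i ≤ j
    case neg =>
      rw [pvLoopA, pvGoB]
      have hseg : (j + 1 - i).toNat = 0 := by omega
      simp [hij, hseg]
    case pos =>
      have hmid := PySem.Int.floordiv_two_mid_bounds hij
      have hmide : PySem.Int.floordiv (i + j) 2 = (i + j) / 2 :=
        PySem.Int.floordiv_eq_ediv_of_pos (by omega)
      rw [hmide] at hmid
      have hlen : ((nums.drop i.toNat).take (j + 1 - i).toNat).length = (j + 1 - i).toNat := by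
        simp; omega
      have hsegne : (nums.drop i.toNat).take (j + 1 - i).toNat ≠ [] := by
        intro h; rw [h] at hlen; simp at hlen; omega
      rw [pvLoopA, pvGoB, dif_pos hij, dif_neg hsegne]
      simp only [hmide, hlen]
      have hm : ((j + 1 - i).toNat - 1) / 2 = ((i + j) / 2 - i).toNat := by omega
      rw [hm]
      have hget : ((nums.drop i.toNat).take (j + 1 - i).toNat).getD ((i + j) / 2 - i).toNat 0
          = (PySem.List.pyGet? nums ((i + j) / 2)).getD 0 := by
        rw [PySem.List.pyGet?_eq_some_getElem nums (by omega) (by omega)]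
        rw [List.getD_eq_getElem _ _ (by rw [hlen]; omega)]
        simp only [List.getElem_take, List.getElem_drop]
        have hidx : i.toNat + ((i + j) / 2 - i).toNat = ((i + j) / 2).toNat := by omega
        simp [hidx]
      rw [hget]
      by_cases hone : (PySem.List.pyGet? nums ((i + j) / 2)).getD 0 = 1
      · rw [if_pos hone, if_pos hone]
        have h1 : ((nums.drop i.toNat).take (j + 1 - i).toNat).drop (((i + j) / 2 - i).toNat + 1)
            = (nums.drop ((i + j) / 2 + 1).toNat).take (j + 1 - ((i + j) / 2 + 1)).toNat := by
          have e1 : i.toNat + (((i + j) / 2 - i).toNat + 1) = ((i + j) / 2 + 1).toNat := by omega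
          have e2 : (j + 1 - i).toNat - (((i + j) / 2 - i).toNat + 1)
              = (j + 1 - ((i + j) / 2 + 1)).toNat := by omega
          rw [List.drop_take, List.drop_drop, e1, e2]
        have h2 : i + ((((i + j) / 2 - i).toNat : Nat) : Int) + 1 = (i + j) / 2 + 1 := by omega
        rw [h1, h2]
        exact ih nums ((i + j) / 2 + 1) j (by omega) (by omega) hj
      · rw [if_neg hone, if_neg hone]
        have h1 : ((nums.drop i.toNat).take (j + 1 - i).toNat).take ((i + j) / 2 - i).toNat
            = (nums.drop i.toNat).take (((i + j) / 2 - 1) + 1 - i).toNat := by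
          have e3 : min ((i + j) / 2 - i).toNat (j + 1 - i).toNat
              = (((i + j) / 2 - 1) + 1 - i).toNat := by omega
          rw [List.take_take, e3]
        rw [h1]
        exact ih nums i ((i + j) / 2 - 1) (by omega) hi (by omega)

theorem find_rightmost_spec_aux (nums : List Int) :
    find_rightmost nums = find_rightmost_alt nums := by
  rw [find_rightmost, find_rightmost_alt]
  by_cases h : (nums.length : Int) = 0
  · have : nums = [] := by
      cases nums with
      | nil => rfl
      | cons a l => exfalso; simp at h; omega
    rw [if_pos h, this, pvGoB]
    simp
  · rw [if_neg h]
    have := pvLoopA_eq_pvGoB nums.length nums 0 ((nums.length : Int) - 1)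
      (by omega) (by omega) (by omega)
    rw [this]
    have hseg : (nums.drop (0 : Int).toNat).take (((nums.length : Int) - 1) + 1 - 0).toNat = nums := by
      simp
    rw [hseg]

-- ===== VERDICT (by name: the statement is the Claim_ definition above) =====
theorem find_rightmost_spec : Claim_equal_find_rightmost := by
  intro nums _
  unfold Spec_find_rightmost
  exact find_rightmost_spec_aux nums
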